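-- pv_equiv track=rewrite | github.com/reyssergameros-art/mcp-alaiia | src/tools/curl_parser/infrastructure/repositories.py | _extract_method
-- ===== SOURCE A (Python) =====
-- from typing import List
--
-- def _extract_method(args: List[str]) -> str:
--     """Extract HTTP method from args."""
--     for i, arg in enumerate(args):
--         if arg in ['-X', '--request'] and i + 1 < len(args):
--             return args[i + 1].upper()
--
--     # If has data, default to POST
--     for arg in args:
--         if arg in ['-d', '--data', '--data-raw', '--data-binary']:
--             return 'POST'
--
--     return 'GET'
-- ===== SOURCE B (Python) =====
-- from typing import List
--
-- def _extract_method(args: List[str]) -> str: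
--     """Extract HTTP method from args (single pass accumulating state)."""
--     method = None
--     has_data = False
--     for i, arg in enumerate(args):
--         if method is None and arg in ('-X', '--request') and i + 1 < len(args):
--             method = args[i + 1].upper()
--         if arg in ('-d', '--data', '--data-raw', '--data-binary'):
--             has_data = True
--     if method is not None:
--         return method
--     return 'POST' if has_data else 'GET'
-- ===== Notes on version B (the rewrite author's own statement) =====
-- stated objective: alternative
-- what changed: Replaces A's two sequential early-return scans with a single pass that accumulates the first -X/--request method and a has_data flag, deciding the result only after the scan.
import Mathlib
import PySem

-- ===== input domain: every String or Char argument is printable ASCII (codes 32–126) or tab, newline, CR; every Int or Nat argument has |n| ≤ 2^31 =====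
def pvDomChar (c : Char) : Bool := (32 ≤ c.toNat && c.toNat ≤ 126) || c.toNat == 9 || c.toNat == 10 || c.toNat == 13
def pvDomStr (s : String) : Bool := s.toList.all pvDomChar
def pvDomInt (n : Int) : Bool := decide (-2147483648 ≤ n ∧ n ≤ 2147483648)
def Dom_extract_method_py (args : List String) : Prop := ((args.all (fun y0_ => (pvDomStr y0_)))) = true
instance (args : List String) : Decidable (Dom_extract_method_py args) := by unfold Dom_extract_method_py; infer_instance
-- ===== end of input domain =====

-- B replaces A's two sequential early-return scans with one pass accumulating state; alternative decomposition, same cost.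

-- ===== PORT A =====
-- first loop: 'for i, arg in enumerate(args): if arg in ['-X','--request'] and i+1 < len(args): return args[i+1].upper()'
-- (i+1 < len(args) holds exactly when the rest of the list after arg is nonempty)
def pvALoop1 : List String → Option String
  | [] => none
  | a :: rest =>
    if (a == "-X" || a == "--request") && !rest.isEmpty then
      some (PySem.Str.upper (rest.headD ""))
    else pvALoop1 rest

-- second loop: 'for arg in args: if arg in ['-d','--data','--data-raw','--data-binary']: return 'POST''
def pvALoop2 : List String → Bool
  | [] => false
  | a :: rest =>
    if a == "-d" || a == "--data" || a == "--data-raw" || a == "--data-binary" then true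
    else pvALoop2 rest

def extract_method_py (args : List String) : String :=
  match pvALoop1 args with
  | some s => s
  | none => if pvALoop2 args then "POST" else "GET"

-- ===== PORT B =====
-- one step of B's single loop body over (i, arg)
def pvBStep (full : List String) (st : Option String × Bool) (p : Int × String) : Option String × Bool :=
  let m := if st.1.isNone && (p.2 == "-X" || p.2 == "--request") && decide (p.1 + 1 < (full.length : Int))
           then (PySem.List.pyGet? full (p.1 + 1)).map PySem.Str.upper
           else st.1
  let d := st.2 || (p.2 == "-d" || p.2 == "--data" || p.2 == "--data-raw" || p.2 == "--data-binary")
  (m, d)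

def extract_method_py_alt (args : List String) : String :=
  let st := (PySem.List.enumerate args 0).foldl (pvBStep args) (none, false)
  match st.1 with
  | some s => s
  | none => if st.2 then "POST" else "GET"

-- ===== PRECONDITION & SPEC =====
def Spec_extract_method_py (args : List String) (out : String) : Prop := out = extract_method_py_alt args
instance (args : List String) (out : String) : Decidable (Spec_extract_method_py args out) := by unfold Spec_extract_method_py; infer_instance

-- ===== CLAIM (what is proved, stated in full; the proofs are below) =====
def Claim_equal_extract_method_py : Prop := ∀ (args : List String), Dom_extract_method_py args → Spec_extract_method_py args (extract_method_py args)

-- ===== LEMMAS AND PROOFS =====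

-- once the method is recorded, it stays recorded (B's fst component)
theorem pvB_fst_some (full : List String) (rest : List String) (s : Int) (m : String) (d : Bool) :
    ((PySem.List.enumerate rest s).foldl (pvBStep full) (some m, d)).1 = some m := by
  induction rest generalizing s d with
  | nil => simp [PySem.List.enumerate]
  | cons a r ih => simp [PySem.List.enumerate_cons, pvBStep, ih]

-- B's snd component accumulates exactly A's second scan
theorem pvB_snd (full : List String) (rest : List String) (s : Int) (m : Option String) (d : Bool) :
    ((PySem.List.enumerate rest s).foldl (pvBStep full) (m, d)).2 = (d || pvALoop2 rest) := by
  induction rest generalizing s m d with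
  | nil => simp [PySem.List.enumerate, pvALoop2]
  | cons a r ih =>
    rw [PySem.List.enumerate_cons, List.foldl_cons]
    show ((PySem.List.enumerate r (s + 1)).foldl (pvBStep full) (pvBStep full (m, d) (s, a))).2 = _
    rcases hst : pvBStep full (m, d) (s, a) with ⟨m', d'⟩
    have hd' : d' = (d || (a == "-d" || a == "--data" || a == "--data-raw" || a == "--data-binary")) := by
      simp [pvBStep] at hst; exact hst.2.symm
    rw [ih, hd', pvALoop2]
    by_cases h : (a == "-d" || a == "--data" || a == "--data-raw" || a == "--data-binary") = true <;> simp [h]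

-- while no method is recorded, B's fst component computes A's first scan on the remaining suffix
theorem pvB_fst_none (pre rest : List String) (d : Bool) :
    ((PySem.List.enumerate rest (pre.length : Int)).foldl (pvBStep (pre ++ rest)) (none, d)).1
      = pvALoop1 rest := by
  induction rest generalizing pre d with
  | nil => simp [PySem.List.enumerate, pvALoop1]
  | cons a r ih =>
    rw [PySem.List.enumerate_cons, List.foldl_cons]
    by_cases hf : (a == "-X" || a == "--request") = true
    · cases r with
      | nil =>
        simp [pvBStep, hf, pvALoop1, PySem.List.enumerate]
      | cons b r' =>
        have hget : PySem.List.pyGet? (pre ++ a :: b :: r') ((pre.length : Int) + 1) = some b := by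
          have h1 : pre ++ a :: b :: r' = (pre ++ [a]) ++ b :: r' := by simp
          have h2 : ((pre.length : Int) + 1) = (((pre ++ [a]).length : Nat) : Int) := by simp
          rw [h1, h2, PySem.List.pyGet?_append_length]
        have hstep : pvBStep (pre ++ a :: b :: r') (none, d) ((pre.length : Int), a)
            = (some (PySem.Str.upper b), d || (a == "-d" || a == "--data" || a == "--data-raw" || a == "--data-binary")) := by
          simp [pvBStep, hf, hget]
        rw [hstep, pvB_fst_some]
        simp [pvALoop1, hf]
    · have hstep : pvBStep (pre ++ a :: r) (none, d) ((pre.length : Int), a)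
          = (none, d || (a == "-d" || a == "--data" || a == "--data-raw" || a == "--data-binary")) := by
        simp [pvBStep, hf]
      rw [hstep]
      have hrw : pre ++ a :: r = (pre ++ [a]) ++ r := by simp
      have hs : ((pre.length : Int) + 1) = (((pre ++ [a]).length : Nat) : Int) := by simp
      rw [hrw, hs, ih]
      simp [pvALoop1, hf]

-- ===== VERDICT (by name: the statement is the Claim_ definition above) =====
theorem extract_method_py_spec : Claim_equal_extract_method_py := by
  intro args _
  unfold Spec_extract_method_py extract_method_py extract_method_py_alt
  have h1 := pvB_fst_none [] args false
  have h2 := pvB_snd args args 0 none false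
  simp only [List.nil_append, List.length_nil, Nat.cast_zero] at h1
  simp only []
  rw [h1, h2]
  cases pvALoop1 args <;> simp
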